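-- pv_equiv track=rewrite | github.com/rafasilveira/advent-of-code-2023 | day02/2-power-cubes.py | get_minimum_set
-- ===== SOURCE A (Python) =====
-- def remove_zeros(game_round: dict[str, int]):
--   return {key: value for key, value in game_round.items() if value != 0}
--
-- def get_minimum_set(game_rounds):
--     minimum_set = {
--     "red": 0,
--     "green": 0,
--     "blue": 0,
--   }
--
--     for round in game_rounds:
--
--       if "red" in round and round["red"] > minimum_set["red"]:
--         minimum_set["red"] = round["red"]
--
--       if "green" in round and round["green"] > minimum_set["green"]:
--         minimum_set["green"] = round["green"]
--
--       if "blue" in round and round["blue"] > minimum_set["blue"]: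
--         minimum_set["blue"] = round["blue"]
--
--     return remove_zeros(minimum_set)
-- ===== SOURCE B (Python) =====
-- def get_minimum_set(game_rounds):
--     result = {}
--     for color in ("red", "green", "blue"):
--         highest = max([0] + [r[color] for r in game_rounds if color in r])
--         if highest != 0:
--             result[color] = highest
--     return result
-- ===== Notes on version B (the rewrite author's own statement) =====
-- stated objective: idiomatic
-- what changed: Loop order interchanged: B computes the maximum per color over all rounds with max([0]+values) and inserts only nonzero maxima, instead of maintaining a running red/green/blue accumulator per round and stripping zeros afterwards.
import Mathlib
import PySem

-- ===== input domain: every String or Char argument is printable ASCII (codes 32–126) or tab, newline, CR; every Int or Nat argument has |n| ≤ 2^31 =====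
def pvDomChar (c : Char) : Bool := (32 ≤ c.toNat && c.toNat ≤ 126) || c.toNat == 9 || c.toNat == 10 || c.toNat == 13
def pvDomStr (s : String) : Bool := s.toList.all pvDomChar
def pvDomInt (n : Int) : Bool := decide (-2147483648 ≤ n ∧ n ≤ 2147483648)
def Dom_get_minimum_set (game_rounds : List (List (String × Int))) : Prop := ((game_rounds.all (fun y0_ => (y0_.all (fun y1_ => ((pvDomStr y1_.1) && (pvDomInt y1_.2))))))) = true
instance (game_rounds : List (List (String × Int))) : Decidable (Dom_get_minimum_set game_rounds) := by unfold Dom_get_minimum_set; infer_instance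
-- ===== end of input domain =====

-- B interchanges the loop order (outer over the three colors, inner max over all rounds) instead of
-- maintaining a running accumulator dict per round; same cost, more idiomatic. Rounds (Python dicts)
-- enter as association lists and are read through PySem.Dict.ofList, i.e. Python's dict(pairs).

-- ===== PORT A =====
def remove_zeros (game_round : PySem.Dict String Int) : PySem.Dict String Int :=
  PySem.Dict.ofList (game_round.items.filter (fun p => p.2 != 0))

def get_minimum_set (game_rounds : List (List (String × Int))) : List (String × Int) :=
  let minimum_set : PySem.Dict String Int :=
    PySem.Dict.ofList [("red", 0), ("green", 0), ("blue", 0)]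
  let minimum_set := game_rounds.foldl (fun ms rnd0 =>
    let rnd := PySem.Dict.ofList rnd0
    let ms := match rnd.get? "red" with
      | some v => if v > ms.getD "red" 0 then ms.insert "red" v else ms
      | none => ms
    let ms := match rnd.get? "green" with
      | some v => if v > ms.getD "green" 0 then ms.insert "green" v else ms
      | none => ms
    let ms := match rnd.get? "blue" with
      | some v => if v > ms.getD "blue" 0 then ms.insert "blue" v else ms
      | none => ms
    ms) minimum_set
  (remove_zeros minimum_set).items

-- ===== PORT B =====
def get_minimum_set_alt (game_rounds : List (List (String × Int))) : List (String × Int) :=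
  (["red", "green", "blue"].foldl (fun result color =>
      -- max([0] + [...]) is never of an empty list; `.getD 0` only discharges the impossible `none`
      let highest : Int :=
        (PySem.List.max? ((0 : Int) :: game_rounds.filterMap
            (fun r => (PySem.Dict.ofList r).get? color)) (fun y => y)).getD 0
      if highest ≠ 0 then result.insert color highest else result)
    PySem.Dict.empty).items

-- ===== PRECONDITION & SPEC =====
def Spec_get_minimum_set (game_rounds : List (List (String × Int))) (out : List (String × Int)) : Prop := out = get_minimum_set_alt game_rounds
instance (game_rounds : List (List (String × Int))) (out : List (String × Int)) : Decidable (Spec_get_minimum_set game_rounds out) := by unfold Spec_get_minimum_set; infer_instance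

-- ===== CLAIM (what is proved, stated in full; the proofs are below) =====
def Claim_equal_get_minimum_set : Prop := ∀ (game_rounds : List (List (String × Int))), Dom_get_minimum_set game_rounds → Spec_get_minimum_set game_rounds (get_minimum_set game_rounds)

-- ===== LEMMAS AND PROOFS =====

-- A's per-color running update, as a standalone fold
def runMax (c : String) (L : List (List (String × Int))) (a : Int) : Int :=
  L.foldl (fun acc r =>
    match (PySem.Dict.ofList r).get? c with
    | some v => if v > acc then v else acc
    | none => acc) a

lemma runMax_eq_foldl_max (c : String) (L : List (List (String × Int))) (a : Int) :
    runMax c L a = (L.filterMap (fun r => (PySem.Dict.ofList r).get? c)).foldl max a := by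
  induction L generalizing a with
  | nil => rfl
  | cons r t ih =>
      simp only [runMax, List.foldl_cons, List.filterMap_cons] at *
      cases h : (PySem.Dict.ofList r).get? c with
      | none => exact ih a
      | some v =>
          simp only
          rw [show (if v > a then v else a) = max a v by
            rcases le_total v a with hle | hle
            · simp [max_eq_left hle, not_lt.mpr hle]
            · rcases eq_or_lt_of_le hle with he | hlt
              · simp [he]
              · simp [max_eq_right hle, hlt]]
          exact ih (max a v)

-- one round of A's loop on the canonical three-key dict
set_option maxHeartbeats 1000000 in
lemma step_canonical (a g b : Int) (r : List (String × Int)) :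
    (let rnd := PySem.Dict.ofList r
     let ms := match rnd.get? "red" with
       | some v => if v > (PySem.Dict.mk [("red", a), ("green", g), ("blue", b)]).getD "red" 0
                   then (PySem.Dict.mk [("red", a), ("green", g), ("blue", b)]).insert "red" v
                   else PySem.Dict.mk [("red", a), ("green", g), ("blue", b)]
       | none => PySem.Dict.mk [("red", a), ("green", g), ("blue", b)]
     let ms := match rnd.get? "green" with
       | some v => if v > ms.getD "green" 0 then ms.insert "green" v else ms
       | none => ms
     let ms := match rnd.get? "blue" with
       | some v => if v > ms.getD "blue" 0 then ms.insert "blue" v else ms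
       | none => ms
     ms)
    = PySem.Dict.mk [
        ("red", match (PySem.Dict.ofList r).get? "red" with
          | some v => if v > a then v else a | none => a),
        ("green", match (PySem.Dict.ofList r).get? "green" with
          | some v => if v > g then v else g | none => g),
        ("blue", match (PySem.Dict.ofList r).get? "blue" with
          | some v => if v > b then v else b | none => b)] := by
  cases hr : (PySem.Dict.ofList r).get? "red" <;>
  cases hg : (PySem.Dict.ofList r).get? "green" <;>
  cases hb : (PySem.Dict.ofList r).get? "blue" <;>
    simp only [hr, hg, hb] <;>
    split_ifs <;>
    (apply PySem.Dict.ext;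
     simp_all [PySem.Dict.items_insert, PySem.Dict.getD, PySem.Dict.get?, PySem.Dict.contains])

-- A's whole loop, on the canonical three-key dict
lemma fold_canonical (L : List (List (String × Int))) (a g b : Int) :
    L.foldl (fun ms rnd0 =>
      let rnd := PySem.Dict.ofList rnd0
      let ms := match rnd.get? "red" with
        | some v => if v > ms.getD "red" 0 then ms.insert "red" v else ms
        | none => ms
      let ms := match rnd.get? "green" with
        | some v => if v > ms.getD "green" 0 then ms.insert "green" v else ms
        | none => ms
      let ms := match rnd.get? "blue" with
        | some v => if v > ms.getD "blue" 0 then ms.insert "blue" v else ms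
        | none => ms
      ms) (PySem.Dict.mk [("red", a), ("green", g), ("blue", b)])
    = PySem.Dict.mk [("red", runMax "red" L a), ("green", runMax "green" L g),
        ("blue", runMax "blue" L b)] := by
  induction L generalizing a g b with
  | nil => rfl
  | cons r t ih =>
      rw [List.foldl_cons, step_canonical, ih]
      rfl

-- ===== VERDICT (by name: the statement is the Claim_ definition above) =====
theorem get_minimum_set_spec : Claim_equal_get_minimum_set := by
  intro L _
  show get_minimum_set L = get_minimum_set_alt L
  simp only [get_minimum_set, get_minimum_set_alt]
  rw [show PySem.Dict.ofList [("red", (0 : Int)), ("green", 0), ("blue", 0)]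
        = PySem.Dict.mk [("red", 0), ("green", 0), ("blue", 0)] by decide]
  rw [fold_canonical]
  simp only [runMax_eq_foldl_max, List.foldl_cons, List.foldl_nil,
    PySem.List.max?_id_cons, Option.getD_some]
  generalize (L.filterMap (fun r => (PySem.Dict.ofList r).get? "red")).foldl max 0 = Mr
  generalize (L.filterMap (fun r => (PySem.Dict.ofList r).get? "green")).foldl max 0 = Mg
  generalize (L.filterMap (fun r => (PySem.Dict.ofList r).get? "blue")).foldl max 0 = Mb
  by_cases h1 : Mr = 0 <;> by_cases h2 : Mg = 0 <;> by_cases h3 : Mb = 0 <;>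
    simp_all [remove_zeros, List.filter_nil, bne,
      PySem.Dict.ofList, PySem.Dict.update, PySem.Dict.insert, PySem.Dict.empty,
      PySem.Dict.contains]
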